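-- pv_equiv track=rewrite | github.com/HyunSeok0328/Algo | 삼성a형/이차원배열과연산.py | calculate
-- ===== SOURCE A (Python) =====
-- def calculate(arr, dir):
--
--     new_arr = []
--     length = 0
--     for row in arr :
--         num_cnt = []
--         new_row = []
--         for num in set(row) :
--             if num == 0 :
--                 continue
--             cnt = row.count(num)
--             num_cnt.append((num,cnt))
--         num_cnt = sorted(num_cnt, key=lambda x:[x[1],x[0]])
--         for num,cnt in num_cnt :
--             new_row += (num,cnt)
--         new_arr.append(new_row)
--         length = max(length, len(new_row))
--
--     for row in new_arr :
--         row += [0] * (length - len(row))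
--         if len(row) > 100 :
--             row = row[:100]
--     if dir == 'C' :
--         return list(zip(*new_arr))
--     else :
--         return new_arr
-- ===== SOURCE B (Python) =====
-- def calculate(arr, dir):
--     rows = []
--     for row in arr:
--         s = sorted(v for v in row if v != 0)
--         cnt_num = []
--         i = 0
--         n = len(s)
--         while i < n:
--             j = i + 1
--             while j < n and s[j] == s[i]:
--                 j += 1
--             cnt_num.append((j - i, s[i]))
--             i = j
--         cnt_num.sort()
--         flat = []
--         for c, v in cnt_num:
--             flat.append(v)
--             flat.append(c)
--         rows.append(flat)
--     width = 0
--     for r in rows: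
--         if len(r) > width:
--             width = len(r)
--     out = [r + [0] * (width - len(r)) for r in rows]
--     if dir == 'C':
--         return list(zip(*out))
--     return out
-- ===== Notes on version B (the rewrite author's own statement) =====
-- stated objective: faster
-- what changed: Per row B sorts the row's nonzero values once and run-length-scans it with a two-index while loop to get (count,value) pairs sorted by a plain tuple sort, replacing A's set(row) iteration with a full row.count scan per distinct value, (num,cnt) pairs under a [cnt,num] key sort, and fold-flatten; width is a running max and padding a comprehension.
import Mathlib
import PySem

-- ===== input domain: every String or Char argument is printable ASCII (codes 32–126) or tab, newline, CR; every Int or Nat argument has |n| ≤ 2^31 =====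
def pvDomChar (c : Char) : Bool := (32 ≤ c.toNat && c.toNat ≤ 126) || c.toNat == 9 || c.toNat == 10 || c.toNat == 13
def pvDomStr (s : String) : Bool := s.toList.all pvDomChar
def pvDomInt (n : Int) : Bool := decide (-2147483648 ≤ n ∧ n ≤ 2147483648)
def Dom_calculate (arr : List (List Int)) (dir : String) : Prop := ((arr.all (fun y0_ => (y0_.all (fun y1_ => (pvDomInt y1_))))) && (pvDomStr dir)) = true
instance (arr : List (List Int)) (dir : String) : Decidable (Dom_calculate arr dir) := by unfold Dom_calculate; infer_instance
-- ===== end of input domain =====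

-- B replaces A's set(row)-iteration with a full row.count scan per distinct value by sorting the
-- row's nonzero values once and run-length-scanning it; pairs are kept as (cnt,num) and sorted by
-- a plain tuple sort instead of (num,cnt) under a [cnt,num] key. Same result, asymptotically fewer scans.
-- Exact model of Python's list(zip(*rows)): emit the heads while every row is nonempty.
def pyZipStar (rows : List (List Int)) : List (List Int) :=
  match rows with
  | [] => []
  | r :: rest =>
      if h : (r :: rest).all (fun x => !x.isEmpty)
      then ((r :: rest).map (fun x => x.headD 0)) :: pyZipStar ((r :: rest).map List.tail)
      else []
termination_by (rows.headD []).length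
decreasing_by
  simp only [List.all_cons, Bool.and_eq_true, Bool.not_eq_true'] at h
  simp only [List.map_cons, List.headD_cons]
  cases r with
  | nil => simp at h
  | cons a t => simp

-- ===== PORT A =====
-- A iterates over set(row); the pairs are then sorted by the injective key (cnt, num), so the
-- hash order of the set does not affect the result — ported through PySem.Set.ofList.
def calculate (arr : List (List Int)) (dir : String) : List (List Int) :=
  let st := arr.foldl (fun (st : List (List Int) × Int) row =>
      let numCnt : List (Int × Int) := (PySem.Set.ofList row).foldl
          (fun acc num => if num = 0 then acc
                          else acc ++ [(num, (PySem.List.count row num : Int))]) []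
      let sortedCnt := PySem.List.sorted2 numCnt (fun x => x.2) (fun x => x.1)
      let newRow := sortedCnt.foldl (fun acc p => acc ++ [p.1, p.2]) []
      (st.1 ++ [newRow], max st.2 (PySem.List.len newRow))) ([], 0)
  -- the in-place 'row += [0]*(length-len(row))' loop; 'row = row[:100]' rebinds a local
  -- and never truncates new_arr, so it contributes nothing
  let padded := st.1.map (fun row => row ++ PySem.List.pyRepeat [0] (st.2 - PySem.List.len row))
  if dir = "C" then pyZipStar padded else padded

-- ===== PORT B =====
-- Source B's inner two-index while loop: one maximal run of equal values per step, (run length, value);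
-- j - i = 1 + number of following equal elements = 1 + takeWhile length, and i jumps to j (dropWhile).
def pvRuns : List Int → List (Int × Int)
  | [] => []
  | a :: t =>
      ((1 + ((t.takeWhile (· == a)).length : Int), a)) :: pvRuns (t.dropWhile (· == a))
termination_by l => l.length
decreasing_by
  simpa using Nat.lt_succ_of_le (List.length_dropWhile_le _ t)

def calculate_alt (arr : List (List Int)) (dir : String) : List (List Int) :=
  let rows := arr.map (fun row =>
      let s := PySem.List.sorted (row.filter (fun v => v != 0)) (fun v => v)
      let cntNum := PySem.List.sorted2 (pvRuns s) (fun p => p.1) (fun p => p.2)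
      cntNum.foldl (fun acc p => acc ++ [p.2, p.1]) [])
  let width := rows.foldl (fun w r => if PySem.List.len r > w then PySem.List.len r else w) 0
  let padded := rows.map (fun r => r ++ PySem.List.pyRepeat [0] (width - PySem.List.len r))
  if dir = "C" then pyZipStar padded else padded

-- ===== PRECONDITION & SPEC =====
def Spec_calculate (arr : List (List Int)) (dir : String) (out : List (List Int)) : Prop := out = calculate_alt arr dir
instance (arr : List (List Int)) (dir : String) (out : List (List Int)) : Decidable (Spec_calculate arr dir out) := by unfold Spec_calculate; infer_instance

-- ===== CLAIM (what is proved, stated in full; the proofs are below) =====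
def Claim_equal_calculate : Prop := ∀ (arr : List (List Int)) (dir : String), Dom_calculate arr dir → Spec_calculate arr dir (calculate arr dir)

-- ===== LEMMAS AND PROOFS =====

-- sorting with a two-component key is sorting by the lexicographic product order
theorem sorted2_eq_sorted_lex {α : Type} (xs : List α) (k1 k2 : α → Int) :
    PySem.List.sorted2 xs k1 k2 = PySem.List.sorted xs (fun x => toLex (k1 x, k2 x)) := by
  rw [PySem.List.sorted_eq_foldl_insertBy]
  show List.foldl (fun acc x => PySem.List.insertBy
      (fun a b => decide (k1 a < k1 b) || (!decide (k1 b < k1 a) && decide (k2 a < k2 b))) x acc) [] xs = _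
  congr 1
  funext acc x
  congr 1
  funext a b
  by_cases h1 : k1 a < k1 b <;> by_cases h2 : k1 b < k1 a <;> by_cases h3 : k2 a < k2 b <;>
    simp [Prod.Lex.toLex_lt_toLex, h1, h2, h3] <;> omega

-- run-length scan facts on a (≤-)sorted list
theorem count_eq_takeWhile_len (a : Int) : ∀ (t : List Int), (∀ x ∈ t, a ≤ x) →
    t.Pairwise (· ≤ ·) → List.count a t = (t.takeWhile (· == a)).length := by
  intro t
  induction t with
  | nil => simp
  | cons b r ih =>
      intro hall hp
      rcases List.pairwise_cons.mp hp with ⟨hb, hr⟩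
      by_cases hba : b = a
      · subst hba
        simp only [List.takeWhile_cons, BEq.rfl, if_pos]
        simp only [List.count_cons_self, List.length_cons]
        rw [ih (fun x hx => hall x (List.mem_cons_of_mem _ hx)) hr]
      · have hab : a < b := lt_of_le_of_ne (hall b (List.mem_cons_self)) (Ne.symm hba)
        have hc0 : List.count a r = 0 := by
          rw [List.count_eq_zero]
          intro hm
          have := hb a hm
          omega
        have hca : List.count a (b :: r) = 0 := by
          simp [hc0, hba]
        simp [hba, hca]

theorem count_dropWhile_of_ne (a v : Int) (t : List Int) (h : v ≠ a) :
    List.count v (t.dropWhile (· == a)) = List.count v t := by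
  conv_rhs => rw [← List.takeWhile_append_dropWhile (p := (· == a)) (l := t)]
  rw [List.count_append]
  have : List.count v (t.takeWhile (· == a)) = 0 := by
    rw [List.count_eq_zero]
    intro hm
    exact h (by simpa using List.mem_takeWhile_imp hm)
  omega

theorem mem_dropWhile_of_ne (a v : Int) (t : List Int) (h : v ≠ a) :
    v ∈ t.dropWhile (· == a) ↔ v ∈ t := by
  conv_rhs => rw [← List.takeWhile_append_dropWhile (p := (· == a)) (l := t)]
  simp only [List.mem_append]
  constructor
  · exact Or.inr
  · rintro (hm | hm)
    · exact absurd (by simpa using List.mem_takeWhile_imp hm) h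
    · exact hm

theorem not_mem_dropWhile_self (a : Int) (t : List Int) (hall : ∀ x ∈ t, a ≤ x)
    (hp : t.Pairwise (· ≤ ·)) : a ∉ t.dropWhile (· == a) := by
  have hsplit : List.count a (t.takeWhile (· == a)) + List.count a (t.dropWhile (· == a))
      = List.count a t := by
    conv_rhs => rw [← List.takeWhile_append_dropWhile (p := (· == a)) (l := t)]
    rw [List.count_append]
  have htake : List.count a (t.takeWhile (· == a)) = (t.takeWhile (· == a)).length := by
    rw [List.count_eq_length]
    intro x hx
    exact (by simpa using List.mem_takeWhile_imp hx : x = a).symm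
  have h0 : List.count a (t.dropWhile (· == a)) = 0 := by
    have := count_eq_takeWhile_len a t hall hp
    omega
  exact List.count_eq_zero.mp h0

theorem mem_pvRuns : ∀ (s : List Int), s.Pairwise (· ≤ ·) → ∀ (c v : Int),
    ((c, v) ∈ pvRuns s ↔ v ∈ s ∧ c = ((List.count v s : Nat) : Int)) := by
  intro s
  induction s using pvRuns.induct with
  | case1 => simp [pvRuns]
  | case2 a t ih =>
      intro hp c v
      rcases List.pairwise_cons.mp hp with ⟨hall, ht⟩
      have ht' : (t.dropWhile (· == a)).Pairwise (· ≤ ·) :=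
        ht.sublist (List.dropWhile_sublist _)
      rw [pvRuns]
      simp only [List.mem_cons, ih ht' c v]
      by_cases hv : v = a
      · subst hv
        have hcnt := count_eq_takeWhile_len v t hall ht
        have hnm := not_mem_dropWhile_self v t hall ht
        constructor
        · rintro (h | ⟨hm, _⟩)
          · refine ⟨Or.inl rfl, ?_⟩
            have : c = 1 + ((t.takeWhile (· == v)).length : Int) := by
              simpa using congrArg Prod.fst h
            simp [List.count_cons_self, this, hcnt]
            omega
          · exact absurd hm hnm
        · rintro ⟨_, hc⟩
          left
          simp only [List.count_cons_self] at hc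
          rw [Prod.mk.injEq]
          refine ⟨?_, rfl⟩
          rw [hc, hcnt]
          push_cast
          omega
      · have hmem := mem_dropWhile_of_ne a v t hv
        have hcd := count_dropWhile_of_ne a v t hv
        constructor
        · rintro (h | ⟨hm, hc⟩)
          · exact absurd (by simpa using congrArg Prod.snd h) hv
          · have hcc : List.count v (a :: t) = List.count v t := by
              simp [Ne.symm hv]
            exact ⟨Or.inr (hmem.mp hm), by rw [hc, hcd, hcc]⟩
        · rintro ⟨hm, hc⟩
          right
          have hcc : List.count v (a :: t) = List.count v t := by
            simp [Ne.symm hv]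
          rcases hm with h | h
          · exact absurd h hv
          · exact ⟨hmem.mpr h, by rw [hc, hcd, hcc]⟩

theorem pvRuns_pairwise_snd : ∀ (s : List Int), s.Pairwise (· ≤ ·) →
    (pvRuns s).Pairwise (fun p q => p.2 < q.2) := by
  intro s
  induction s using pvRuns.induct with
  | case1 => simp [pvRuns]
  | case2 a t ih =>
      intro hp
      rcases List.pairwise_cons.mp hp with ⟨hall, ht⟩
      have ht' : (t.dropWhile (· == a)).Pairwise (· ≤ ·) :=
        ht.sublist (List.dropWhile_sublist _)
      rw [pvRuns]
      refine List.pairwise_cons.mpr ⟨?_, ih ht'⟩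
      rintro ⟨c, v⟩ hq
      have hv : v ∈ t.dropWhile (· == a) := ((mem_pvRuns _ ht' c v).mp hq).1
      have hva : v ≠ a := fun h => not_mem_dropWhile_self a t hall ht (h ▸ hv)
      have : v ∈ t := (mem_dropWhile_of_ne a v t hva).mp hv
      exact lt_of_le_of_ne (hall v this) (Ne.symm hva)

-- the pairs A collects, in its set-iteration order
theorem pairsA_eq (row : List Int) :
    (PySem.Set.ofList row).foldl
        (fun acc num => if num = 0 then acc
                        else acc ++ [(num, (PySem.List.count row num : Int))]) []
      = ((PySem.Set.ofList row).filter (fun v => decide (¬ v = 0))).map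
          (fun v => (v, ((List.count v row : Nat) : Int))) := by
  have hfun : (fun (acc : List (Int × Int)) num => if num = 0 then acc
                        else acc ++ [(num, (PySem.List.count row num : Int))])
      = fun acc num => if num ≠ 0 then acc ++ [(num, (PySem.List.count row num : Int))] else acc := by
    funext acc num
    by_cases h : num = 0 <;> simp [h]
  rw [hfun, PySem.List.foldl_append_ite]
  simp only [List.nil_append]
  apply List.map_congr_left
  intro v _
  simp [PySem.List.count_eq]

-- the central fact: B's (cnt,num)-sorted run list is A's (num,cnt)-sorted pair list, swapped
theorem row_eq (row : List Int) :
    (PySem.List.sorted2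
        ((PySem.Set.ofList row).foldl
          (fun acc num => if num = 0 then acc
                          else acc ++ [(num, (PySem.List.count row num : Int))]) [])
        (fun x => x.2) (fun x => x.1)).foldl (fun acc p => acc ++ [p.1, p.2]) []
    = (PySem.List.sorted2
        (pvRuns (PySem.List.sorted (row.filter (fun v => v != 0)) (fun v => v)))
        (fun p => p.1) (fun p => p.2)).foldl (fun acc p => acc ++ [p.2, p.1]) [] := by
  rw [pairsA_eq]
  set pairsA := ((PySem.Set.ofList row).filter (fun v => decide (¬ v = 0))).map
      (fun v => (v, ((List.count v row : Nat) : Int))) with hpA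
  set s := PySem.List.sorted (row.filter (fun v => v != 0)) (fun v => v) with hs
  have hs_pair : s.Pairwise (· ≤ ·) := PySem.List.sorted_pairwise _ _
  have hs_mem : ∀ v, v ∈ s ↔ v ∈ row ∧ v ≠ 0 := by
    intro v
    rw [hs, PySem.List.mem_sorted, List.mem_filter]
    simp [bne]
  have hs_count : ∀ v : Int, v ≠ 0 → List.count v s = List.count v row := by
    intro v hv
    rw [hs, (PySem.List.sorted_perm _ _ _).count_eq, List.count_filter]
    simp [bne, hv]
  -- membership of B's run pairs and of A's pairs swapped agree
  have hB_mem : ∀ c v : Int, ((c, v) ∈ pvRuns s ↔ v ∈ row ∧ v ≠ 0 ∧ c = ((List.count v row : Nat) : Int)) := by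
    intro c v
    rw [mem_pvRuns s hs_pair c v]
    constructor
    · rintro ⟨hm, hc⟩
      rcases (hs_mem v).mp hm with ⟨h1, h2⟩
      exact ⟨h1, h2, by rw [hc, hs_count v h2]⟩
    · rintro ⟨h1, h2, h3⟩
      exact ⟨(hs_mem v).mpr ⟨h1, h2⟩, by rw [h3, hs_count v h2]⟩
  have hA_swap_mem : ∀ c v : Int,
      ((c, v) ∈ pairsA.map (fun p => (p.2, p.1)) ↔ v ∈ row ∧ v ≠ 0 ∧ c = ((List.count v row : Nat) : Int)) := by
    intro c v
    rw [hpA, List.map_map]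
    simp only [List.mem_map, Function.comp, List.mem_filter, PySem.Set.mem_ofList, Prod.mk.injEq]
    constructor
    · rintro ⟨w, ⟨hw1, hw2⟩, hc, hv⟩
      subst hv
      exact ⟨hw1, by simpa using hw2, hc.symm⟩
    · rintro ⟨h1, h2, h3⟩
      exact ⟨v, ⟨h1, by simpa using h2⟩, h3.symm, rfl⟩
  -- the two pair lists are nodup, hence permutations of each other
  have hA_nodup : pairsA.Nodup := by
    rw [hpA]
    exact (((PySem.Set.nodup_ofList row).filter _).map
      (fun a b h => by simpa using congrArg Prod.fst h))
  have hB_nodup : (pvRuns s).Nodup :=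
    (pvRuns_pairwise_snd s hs_pair).imp (fun h => by rintro rfl; exact absurd h (lt_irrefl _))
  have hperm : (pairsA.map (fun p => (p.2, p.1))).Perm (pvRuns s) := by
    refine (List.perm_ext_iff_of_nodup
      (hA_nodup.map (fun a b h => by
        have := congrArg Prod.fst h
        have := congrArg Prod.snd h
        exact Prod.ext (by simpa using congrArg Prod.snd h) (by simpa using congrArg Prod.fst h)))
      hB_nodup).mpr ?_
    rintro ⟨c, v⟩
    rw [hA_swap_mem c v, hB_mem c v]
  -- name A's sorted list and show B's sorted list is its swap
  rw [sorted2_eq_sorted_lex, sorted2_eq_sorted_lex]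
  set LA := PySem.List.sorted pairsA (fun x => toLex (x.2, x.1)) with hLA
  have hLA_perm : LA.Perm pairsA := PySem.List.sorted_perm _ _ _
  have hLA_lt : LA.Pairwise (fun a b => toLex (a.2, a.1) < toLex (b.2, b.1)) := by
    have h1 : LA.Pairwise (fun a b => toLex (a.2, a.1) ≤ toLex (b.2, b.1)) :=
      PySem.List.sorted_pairwise _ _
    have h2 : LA.Nodup := hLA_perm.nodup_iff.mpr hA_nodup
    exact (h1.and h2).imp (fun ⟨hle, hne⟩ => lt_of_le_of_ne hle (fun h => hne (by
      have hx := congrArg (fun z => (ofLex z).1) h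
      have hy := congrArg (fun z => (ofLex z).2) h
      exact Prod.ext (by simpa using hy) (by simpa using hx))))
  have hBsorted : PySem.List.sorted (pvRuns s) (fun x => toLex (x.1, x.2))
      = LA.map (fun p => (p.2, p.1)) := by
    apply PySem.List.sorted_eq_of_perm_of_pairwise_lt
    · exact (hLA_perm.map _).trans hperm
    · rw [List.pairwise_map]
      exact hLA_lt
  rw [hBsorted]
  rw [PySem.List.foldl_append_eq_flatMap (g := fun p : Int × Int => [p.1, p.2]),
      PySem.List.foldl_append_eq_flatMap (g := fun p : Int × Int => [p.2, p.1])]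
  simp [List.flatMap_map]

theorem foldA (g : List Int → List Int) : ∀ (arr : List (List Int)) (acc : List (List Int)) (m : Int),
    arr.foldl (fun st row => (st.1 ++ [g row], max st.2 (PySem.List.len (g row)))) (acc, m)
    = (acc ++ arr.map g, (arr.map g).foldl (fun w r => max w (PySem.List.len r)) m) := by
  intro arr
  induction arr with
  | nil => simp
  | cons r t ih => intro acc m; simp only [List.foldl_cons, List.map_cons]; rw [ih]; simp

theorem width_if_eq_max : ∀ (l : List (List Int)) (m : Int),
    l.foldl (fun w r => if PySem.List.len r > w then PySem.List.len r else w) m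
    = l.foldl (fun w r => max w (PySem.List.len r)) m := by
  intro l
  induction l with
  | nil => simp
  | cons r t ih =>
      intro m
      simp only [List.foldl_cons, ih]
      congr 1
      omega

theorem calculate_spec_aux : ∀ (arr : List (List Int)) (dir : String),
    calculate arr dir = calculate_alt arr dir := by
  intro arr dir
  unfold calculate calculate_alt
  simp only [row_eq]
  rw [foldA, width_if_eq_max]
  simp

-- ===== VERDICT (by name: the statement is the Claim_ definition above) =====
theorem calculate_spec : Claim_equal_calculate := by
  intro arr dir _
  unfold Spec_calculate
  exact calculate_spec_aux arr dir
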